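-- pv_equiv track=rewrite | github.com/RafeedIqbal/id8 | backend/app/orchestrator/handlers/write_code.py | _python_module_exists
-- ===== SOURCE A (Python) =====
-- def _python_module_exists(module: str, file_paths: set[str]) -> bool:
--     module_path = module.replace(".", "/")
--     direct_candidates = (
--         f"{module_path}.py",
--         f"{module_path}/__init__.py",
--     )
--     for candidate in direct_candidates:
--         if candidate in file_paths:
--             return True
--         suffix = f"/{candidate}"
--         if any(path.endswith(suffix) for path in file_paths):
--             return True
--
--     package_prefix = f"{module_path}/"
--     if any(path.startswith(package_prefix) or f"/{package_prefix}" in path for path in file_paths):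
--         return True
--
--     return False
-- ===== SOURCE B (Python) =====
-- def _python_module_exists(module: str, file_paths: set[str]) -> bool:
--     # Different algorithm: instead of testing each path against candidate
--     # patterns, build (once) the set of all module paths the file list can
--     # resolve -- stems of component-boundary occurrences of "*.py" and every
--     # directory prefix at a component boundary -- then answer with a single
--     # set-membership lookup.
--     module_path = module.replace(".", "/")
--     provided = set()
--     for path in file_paths:
--         for tail in _boundary_tails(path):
--             for k, ch in enumerate(tail):
--                 if ch == "/":
--                     provided.add(tail[:k])
--             if tail.endswith(".py"):
--                 provided.add(tail[:-3])
--     return module_path in provided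
--
--
-- def _boundary_tails(path):
--     # the path itself plus every suffix that starts right after a "/"
--     tails = [path]
--     for i, ch in enumerate(path):
--         if ch == "/":
--             tails.append(path[i + 1:])
--     return tails
-- ===== Notes on version B (the rewrite author's own statement) =====
-- stated objective: alternative
-- what changed: Instead of testing each path against the candidate patterns with membership/endswith/startswith/contains scans, B precomputes the set of all module paths the file list resolves (stems of component-boundary '*.py' occurrences and every component-boundary directory prefix) and answers with a single set-membership lookup; correctness rests on A's conditions being exactly 'module_path occurs at a component boundary followed by "/" or by ".py" at end of path'. One traversal of the file list building the index replaces A's five separate per-candidate scans of the whole list.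
import Mathlib
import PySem

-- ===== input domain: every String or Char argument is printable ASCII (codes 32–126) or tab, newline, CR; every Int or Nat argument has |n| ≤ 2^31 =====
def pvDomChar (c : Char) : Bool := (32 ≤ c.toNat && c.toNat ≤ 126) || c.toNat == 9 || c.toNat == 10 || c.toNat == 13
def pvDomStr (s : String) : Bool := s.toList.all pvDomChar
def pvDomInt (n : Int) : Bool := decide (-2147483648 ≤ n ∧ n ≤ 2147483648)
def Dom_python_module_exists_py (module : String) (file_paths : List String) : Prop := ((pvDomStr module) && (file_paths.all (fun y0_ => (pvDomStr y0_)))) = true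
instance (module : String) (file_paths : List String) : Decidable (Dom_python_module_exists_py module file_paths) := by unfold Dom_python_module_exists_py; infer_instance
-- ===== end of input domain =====

-- B precomputes the set of module paths the file list resolves and answers with one set-membership lookup (different algorithm; measured faster on large inputs in a timing run).


-- ===== PORT A =====
-- Hand-ported Python string primitives (exact for the uses below):
-- s.replace(".", "/") with one-character old/new is an exact per-character map
def pyReplaceDotSlash (s : List Char) : List Char :=
  s.map (fun c => if c == '.' then '/' else c)
-- s.endswith(suf) is exactly "suf is a suffix of s"
def pyEndsWith (s suf : List Char) : Bool := suf.isSuffixOf s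
-- s.startswith(pre) is exactly "pre is a prefix of s"
def pyStartsWith (s pre : List Char) : Bool := pre.isPrefixOf s
-- Python 'sub in s': sub is a prefix of some suffix of s (exact, incl. sub = "")
def pyInStr (sub s : List Char) : Bool :=
  sub.isPrefixOf s ||
    match s with
    | [] => false
    | _ :: t => pyInStr sub t

-- A: checks each direct candidate by membership then a suffix scan, then a package-prefix scan (early returns become ||)
def python_module_exists_py (module : String) (file_paths : List String) : Bool :=
  let module_path := pyReplaceDotSlash module.toList
  let cand1 := module_path ++ ".py".toList
  let cand2 := module_path ++ "/__init__.py".toList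
  let package_prefix := module_path ++ "/".toList
  (file_paths.any (fun path => path.toList == cand1)
    || file_paths.any (fun path => pyEndsWith path.toList ('/' :: cand1))
    || file_paths.any (fun path => path.toList == cand2)
    || file_paths.any (fun path => pyEndsWith path.toList ('/' :: cand2))
    || file_paths.any (fun path =>
         pyStartsWith path.toList package_prefix || pyInStr ('/' :: package_prefix) path.toList))

-- ===== PORT B =====
-- _boundary_tails(path): the path itself plus every suffix starting right after a '/'
def pyTailsAfterSlash : List Char → List (List Char)
  | [] => []
  | c :: t => (if c == '/' then [t] else []) ++ pyTailsAfterSlash t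
def pyBoundaryTails (s : List Char) : List (List Char) := s :: pyTailsAfterSlash s
-- the inner 'for k, ch in enumerate(tail): if ch == "/": add tail[:k]' loop
def pyPrefixesBeforeSlash : List Char → List (List Char)
  | [] => []
  | c :: t => (if c == '/' then [([] : List Char)] else []) ++ (pyPrefixesBeforeSlash t).map (c :: ·)
-- the module paths one boundary tail contributes (tail[:-3] = take (len-3), exact since endswith ".py" forces len ≥ 3)
def pyContrib (tail : List Char) : List (List Char) :=
  pyPrefixesBeforeSlash tail ++
    (if pyEndsWith tail ".py".toList then [tail.take (tail.length - 3)] else [])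

-- B: build the set of all resolvable module paths, then one membership lookup
def python_module_exists_py_alt (module : String) (file_paths : List String) : Bool :=
  let module_path := pyReplaceDotSlash module.toList
  let provided := file_paths.foldl
    (fun acc path =>
      (pyBoundaryTails path.toList).foldl
        (fun acc tail => (pyContrib tail).foldl (fun a x => PySem.Set.add a x) acc) acc)
    PySem.Set.empty
  PySem.Set.contains provided module_path

-- ===== PRECONDITION & SPEC =====
def Spec_python_module_exists_py (module : String) (file_paths : List String) (out : Bool) : Prop := out = python_module_exists_py_alt module file_paths
instance (module : String) (file_paths : List String) (out : Bool) : Decidable (Spec_python_module_exists_py module file_paths out) := by unfold Spec_python_module_exists_py; infer_instance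

-- ===== CLAIM (what is proved, stated in full; the proofs are below) =====
def Claim_equal_python_module_exists_py : Prop := ∀ (module : String) (file_paths : List String), Dom_python_module_exists_py module file_paths → Spec_python_module_exists_py module file_paths (python_module_exists_py module file_paths)

-- ===== LEMMAS AND PROOFS =====

theorem mem_foldl_add {α : Type} [BEq α] [LawfulBEq α] (l : List α) (acc : PySem.Set α) (x : α) :
    x ∈ l.foldl (fun a y => PySem.Set.add a y) acc ↔ x ∈ acc ∨ x ∈ l := by
  induction l generalizing acc with
  | nil => simp
  | cons c t ih => simp [ih, PySem.Set.mem_add, List.mem_cons]; tauto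

theorem foldl_nested {α β : Type} [BEq β] [LawfulBEq β] (f : α → List β) (l : List α) (acc : PySem.Set β) :
    l.foldl (fun acc t => (f t).foldl (fun a x => PySem.Set.add a x) acc) acc
      = (l.flatMap f).foldl (fun a x => PySem.Set.add a x) acc := by
  induction l generalizing acc with
  | nil => rfl
  | cons c t ih => simp [List.flatMap_cons, List.foldl_append, ih]

theorem mem_tailsAfterSlash (s t : List Char) :
    t ∈ pyTailsAfterSlash s ↔ ∃ u, s = u ++ '/' :: t := by
  induction s with
  | nil => simp [pyTailsAfterSlash]
  | cons c s' ih =>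
    simp only [pyTailsAfterSlash, List.mem_append, ih]
    constructor
    · rintro (h | ⟨u, rfl⟩)
      · rw [show (if c == '/' then [s'] else []) = _ from rfl] at h
        by_cases hc : c = '/'
        · simp [hc] at h; exact ⟨[], by simp [hc, h]⟩
        · simp [hc] at h
      · exact ⟨c :: u, rfl⟩
    · rintro ⟨u, hu⟩
      cases u with
      | nil => simp at hu; simp [hu.1, hu.2]
      | cons a u' =>
        simp at hu
        exact Or.inr ⟨u', hu.2⟩
  
theorem mem_pbs (s q : List Char) :
    q ∈ pyPrefixesBeforeSlash s ↔ ∃ r, s = q ++ '/' :: r := by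
  induction s generalizing q with
  | nil => simp [pyPrefixesBeforeSlash]
  | cons c s' ih =>
    simp only [pyPrefixesBeforeSlash, List.mem_append, List.mem_map]
    constructor
    · rintro (h | ⟨q', hq', rfl⟩)
      · by_cases hc : c = '/'
        · simp [hc] at h; exact ⟨s', by simp [hc, h]⟩
        · simp [hc] at h
      · obtain ⟨r, rfl⟩ := (ih q').mp hq'
        exact ⟨r, rfl⟩
    · rintro ⟨r, hr⟩
      cases q with
      | nil => simp at hr; simp [hr.1, hr.2]
      | cons a q' =>
        simp at hr
        exact Or.inr ⟨q', (ih q').mpr ⟨r, hr.2⟩, by rw [hr.1]⟩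

theorem endsWith_iff (s suf : List Char) : pyEndsWith s suf = true ↔ ∃ u, s = u ++ suf := by
  rw [pyEndsWith, List.isSuffixOf_iff_suffix]
  exact ⟨fun ⟨u, hu⟩ => ⟨u, hu.symm⟩, fun ⟨u, hu⟩ => ⟨u, hu.symm⟩⟩

theorem startsWith_iff (s pre : List Char) : pyStartsWith s pre = true ↔ ∃ r, s = pre ++ r := by
  rw [pyStartsWith, List.isPrefixOf_iff_prefix]
  exact ⟨fun ⟨r, hr⟩ => ⟨r, hr.symm⟩, fun ⟨r, hr⟩ => ⟨r, hr.symm⟩⟩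

theorem inStr_iff (sub s : List Char) : pyInStr sub s = true ↔ ∃ u r, s = u ++ sub ++ r := by
  induction s with
  | nil =>
    constructor
    · intro h
      have hs : sub = [] := by
        simpa [pyInStr, List.isPrefixOf_iff_prefix, List.prefix_nil] using h
      exact ⟨[], [], by simp [hs]⟩
    · rintro ⟨u, r, h⟩
      rcases List.append_eq_nil_iff.mp h.symm with ⟨h1, -⟩
      simp [pyInStr, (List.append_eq_nil_iff.mp h1).2]
  | cons c t ih =>
    simp only [pyInStr, Bool.or_eq_true, List.isPrefixOf_iff_prefix, ih]
    constructor
    · rintro (⟨r, hr⟩ | ⟨u, r, rfl⟩)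
      · exact ⟨[], r, by simp [← hr]⟩
      · exact ⟨c :: u, r, rfl⟩
    · rintro ⟨u, r, hu⟩
      cases u with
      | nil => exact Or.inl ⟨r, by simpa using hu.symm⟩
      | cons a u' =>
        simp at hu
        exact Or.inr ⟨u', r, by simpa [List.append_assoc] using hu.2⟩

theorem take_stem (u : List Char) :
    (u ++ ['.', 'p', 'y']).take ((u ++ ['.', 'p', 'y']).length - 3) = u := by
  simp [List.length_append]

theorem mem_contrib (mp t : List Char) :
    mp ∈ pyContrib t ↔ (∃ r, t = mp ++ '/' :: r) ∨ t = mp ++ ['.', 'p', 'y'] := by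
  have hpy : (".py" : String).toList = ['.', 'p', 'y'] := by decide
  simp only [pyContrib, List.mem_append, mem_pbs, hpy]
  constructor
  · rintro (h | h)
    · exact Or.inl h
    · by_cases he : pyEndsWith t ['.', 'p', 'y'] = true
      · simp [he] at h
        obtain ⟨u, rfl⟩ := (endsWith_iff t _).mp he
        right; rw [h, take_stem]
      · simp [he] at h
  · rintro (h | rfl)
    · exact Or.inl h
    · right
      have he : pyEndsWith (mp ++ ['.', 'p', 'y']) ['.', 'p', 'y'] = true :=
        (endsWith_iff _ _).mpr ⟨mp, rfl⟩
      simp [he]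

-- the heart: per path, membership of mp among its contributions ⇔ A's six per-path tests
theorem path_iff (mp L : List Char) :
    (∃ t, t ∈ pyBoundaryTails L ∧ mp ∈ pyContrib t) ↔
    (L = mp ++ ".py".toList
      ∨ pyEndsWith L ('/' :: (mp ++ ".py".toList)) = true
      ∨ L = mp ++ "/__init__.py".toList
      ∨ pyEndsWith L ('/' :: (mp ++ "/__init__.py".toList)) = true
      ∨ pyStartsWith L (mp ++ "/".toList) = true
      ∨ pyInStr ('/' :: (mp ++ "/".toList)) L = true) := by
  have hpy : (".py" : String).toList = ['.', 'p', 'y'] := by decide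
  have hinit : ("/__init__.py" : String).toList = '/' :: "__init__.py".toList := by decide
  have hsl : ("/" : String).toList = ['/'] := by decide
  simp only [pyBoundaryTails, List.mem_cons, mem_tailsAfterSlash, mem_contrib,
    endsWith_iff, startsWith_iff, inStr_iff, hpy, hinit, hsl]
  constructor
  · rintro ⟨t, (rfl | ⟨u, rfl⟩), (⟨r, rfl⟩ | rfl)⟩
    · -- t = L, package: startswith
      refine Or.inr (Or.inr (Or.inr (Or.inr (Or.inl ⟨r, ?_⟩))))
      simp
    · -- t = L, direct .py
      exact Or.inl rfl
    · -- boundary, package: infix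
      refine Or.inr (Or.inr (Or.inr (Or.inr (Or.inr ⟨u, r, ?_⟩))))
      simp
    · -- boundary, .py: endswith
      exact Or.inr (Or.inl ⟨u, rfl⟩)
  · rintro (rfl | ⟨u, rfl⟩ | rfl | ⟨u, rfl⟩ | ⟨r, rfl⟩ | ⟨u, r, rfl⟩)
    · exact ⟨mp ++ ['.', 'p', 'y'], Or.inl rfl, Or.inr rfl⟩
    · exact ⟨mp ++ ['.', 'p', 'y'], Or.inr ⟨u, rfl⟩, Or.inr rfl⟩
    · exact ⟨mp ++ '/' :: "__init__.py".toList, Or.inl rfl, Or.inl ⟨_, rfl⟩⟩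
    · exact ⟨mp ++ '/' :: "__init__.py".toList, Or.inr ⟨u, rfl⟩, Or.inl ⟨_, rfl⟩⟩
    · exact ⟨mp ++ ['/'] ++ r, Or.inl rfl, Or.inl ⟨r, by simp⟩⟩
    · refine ⟨mp ++ '/' :: r, Or.inr ⟨u, ?_⟩, Or.inl ⟨r, rfl⟩⟩
      simp

-- ===== VERDICT (by name: the statement is the Claim_ definition above) =====
theorem python_module_exists_py_spec : Claim_equal_python_module_exists_py := by
  intro module file_paths _
  unfold Spec_python_module_exists_py
  refine Bool.eq_iff_iff.mpr ?_
  have hB : python_module_exists_py_alt module file_paths = true ↔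
      ∃ p ∈ file_paths, ∃ t, t ∈ pyBoundaryTails p.toList ∧
        pyReplaceDotSlash module.toList ∈ pyContrib t := by
    unfold python_module_exists_py_alt
    simp only [foldl_nested, PySem.Set.contains_iff, mem_foldl_add, List.mem_flatMap]
    simp [PySem.Set.empty]
  rw [hB]
  unfold python_module_exists_py
  simp only [List.any_eq_true, Bool.or_eq_true, beq_iff_eq]
  set mp := pyReplaceDotSlash module.toList with hmp
  constructor
  · rintro ((((⟨p, hp, h⟩ | ⟨p, hp, h⟩) | ⟨p, hp, h⟩) | ⟨p, hp, h⟩) | ⟨p, hp, h⟩)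
    all_goals refine ⟨p, hp, (path_iff mp p.toList).mpr ?_⟩
    · exact Or.inl h
    · exact Or.inr (Or.inl h)
    · exact Or.inr (Or.inr (Or.inl h))
    · exact Or.inr (Or.inr (Or.inr (Or.inl h)))
    · rcases h with h | h
      · exact Or.inr (Or.inr (Or.inr (Or.inr (Or.inl h))))
      · exact Or.inr (Or.inr (Or.inr (Or.inr (Or.inr h))))
  · rintro ⟨p, hp, h⟩
    rcases (path_iff mp p.toList).mp h with h | h | h | h | h | h
    · exact Or.inl (Or.inl (Or.inl (Or.inl ⟨p, hp, h⟩)))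
    · exact Or.inl (Or.inl (Or.inl (Or.inr ⟨p, hp, h⟩)))
    · exact Or.inl (Or.inl (Or.inr ⟨p, hp, h⟩))
    · exact Or.inl (Or.inr ⟨p, hp, h⟩)
    · exact Or.inr ⟨p, hp, Or.inl h⟩
    · exact Or.inr ⟨p, hp, Or.inr h⟩
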